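-- pv_equiv track=rewrite | github.com/tianyi-gu/news-api | deployment/app/utils/text_utils.py | parse_article_content
-- ===== SOURCE A (Python) =====
-- def parse_article_content(content: str):
--     """Parse article content with metadata"""
--     lines = content.split('\n')
--     metadata = {}
--     content_lines = []
--     parsing_content = False
--
--     for line in lines:
--         if line.strip() == '---':
--             parsing_content = True
--             continue
--         if not parsing_content:
--             if ':' in line:
--                 key, value = line.split(':', 1)
--                 metadata[key.strip().lower()] = value.strip()
--         else:
--             content_lines.append(line)
--
--     return metadata, '\n'.join(content_lines)
-- ===== SOURCE B (Python) =====
-- def parse_article_content(content: str):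
--     """Parse article content with metadata"""
--     lines = content.split('\n')
--     idx = next((i for i, l in enumerate(lines) if l.strip() == '---'), len(lines))
--     metadata = {}
--     for line in lines[:idx]:
--         if ':' in line:
--             key, value = line.split(':', 1)
--             metadata[key.strip().lower()] = value.strip()
--     body = [l for l in lines[idx + 1:] if l.strip() != '---']
--     return metadata, '\n'.join(body)
-- ===== Notes on version B (the rewrite author's own statement) =====
-- stated objective: simpler
-- what changed: Replaced A's single flag-driven scan with a split-first decomposition: locate the first '---' separator line, parse metadata in one pass over the header slice, and build the body by filtering the tail slice, instead of threading a parsing_content flag through one loop.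
import Mathlib
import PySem

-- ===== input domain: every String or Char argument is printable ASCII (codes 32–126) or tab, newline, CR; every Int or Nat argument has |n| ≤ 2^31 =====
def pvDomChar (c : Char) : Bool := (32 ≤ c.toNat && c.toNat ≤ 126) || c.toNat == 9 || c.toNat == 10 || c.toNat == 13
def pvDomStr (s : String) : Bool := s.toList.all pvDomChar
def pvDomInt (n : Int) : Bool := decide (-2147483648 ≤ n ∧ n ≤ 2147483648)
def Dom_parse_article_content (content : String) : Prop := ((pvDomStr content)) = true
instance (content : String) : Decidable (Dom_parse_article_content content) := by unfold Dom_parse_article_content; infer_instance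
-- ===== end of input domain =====

-- B parses the same article text by splitting header/body at the first '---' line and running
-- two separate passes (metadata fold over the header, filter over the tail) instead of A's
-- single flag-driven scan; objective: simpler decomposition, same O(n) cost.


-- ===== PORT A =====
-- A's loop body: state = (metadata, content_lines, parsing_content), branches in A's order.
def aStep (st : PySem.Dict String String × List String × Bool) (line : String) :
    PySem.Dict String String × List String × Bool :=
  if PySem.Str.strip line == "---" then (st.1, st.2.1, true)
  else if !st.2.2 then
    if PySem.Str.isIn ":" line then
      match PySem.Str.splitMax? line ":" 1 with
      | some (key :: value :: _) =>
          (st.1.insert (PySem.Str.lower (PySem.Str.strip key)) (PySem.Str.strip value), st.2.1, st.2.2)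
      | _ => (st.1, st.2.1, st.2.2)
    else (st.1, st.2.1, st.2.2)
  else (st.1, st.2.1 ++ [line], st.2.2)

def parse_article_content (content : String) : (List (String × String)) × String :=
  let lines := (PySem.Str.split? content "\n").getD []
  let st := lines.foldl aStep (PySem.Dict.empty, [], false)
  (st.1.items, PySem.Str.join "\n" st.2.1)

-- ===== PORT B =====
-- B's metadata pass over a header line.
def bParseLine (md : PySem.Dict String String) (line : String) : PySem.Dict String String :=
  if PySem.Str.isIn ":" line then
    match PySem.Str.splitMax? line ":" 1 with
    | some (key :: value :: _) =>
        md.insert (PySem.Str.lower (PySem.Str.strip key)) (PySem.Str.strip value)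
    | _ => md
  else md

def parse_article_content_alt (content : String) : (List (String × String)) × String :=
  let lines := (PySem.Str.split? content "\n").getD []
  let idx := lines.findIdx (fun l => PySem.Str.strip l == "---")
  let metadata := (lines.take idx).foldl bParseLine PySem.Dict.empty
  let body := (lines.drop (idx + 1)).filter (fun l => !(PySem.Str.strip l == "---"))
  (metadata.items, PySem.Str.join "\n" body)

-- ===== PRECONDITION & SPEC =====
def Spec_parse_article_content (content : String) (out : (List (String × String)) × String) : Prop := out = parse_article_content_alt content
instance (content : String) (out : (List (String × String)) × String) : Decidable (Spec_parse_article_content content out) := by unfold Spec_parse_article_content; infer_instance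

-- ===== CLAIM (what is proved, stated in full; the proofs are below) =====
def Claim_equal_parse_article_content : Prop := ∀ (content : String), Dom_parse_article_content content → Spec_parse_article_content content (parse_article_content content)

-- ===== LEMMAS AND PROOFS =====

-- Once A's flag is true, the loop only filters '---' lines into content_lines.
theorem aStep_foldl_true (ls : List String) (md : PySem.Dict String String) (cl : List String) :
    ls.foldl aStep (md, cl, true) =
      (md, cl ++ ls.filter (fun l => !(PySem.Str.strip l == "---")), true) := by
  induction ls generalizing cl with
  | nil => simp
  | cons x xs ih =>
    by_cases h : PySem.Str.strip x == "---"
    · simp [aStep, h, ih]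
    · simp [aStep, h, ih]

-- With the flag false, A's loop is B's decomposition at the first '---' line.
theorem aStep_foldl_false (ls : List String) (md : PySem.Dict String String) (cl : List String) :
    ((ls.foldl aStep (md, cl, false)).1,
     (ls.foldl aStep (md, cl, false)).2.1) =
      ((ls.take (ls.findIdx (fun l => PySem.Str.strip l == "---"))).foldl bParseLine md,
       cl ++ (ls.drop (ls.findIdx (fun l => PySem.Str.strip l == "---") + 1)).filter
               (fun l => !(PySem.Str.strip l == "---"))) := by
  induction ls generalizing md with
  | nil => simp
  | cons x xs ih =>
    by_cases h : PySem.Str.strip x == "---"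
    · simp [aStep, h, List.findIdx_cons, aStep_foldl_true]
    · have hstep : aStep (md, cl, false) x = (bParseLine md x, cl, false) := by
        unfold aStep bParseLine
        simp only [h, Bool.false_eq_true, if_false, Bool.not_false, if_true]
        split
        · split <;> rfl
        · rfl
      simp [List.foldl_cons, hstep, List.findIdx_cons, h, ih (bParseLine md x)]

-- ===== VERDICT (by name: the statement is the Claim_ definition above) =====
theorem parse_article_content_spec : Claim_equal_parse_article_content := by
  intro content _
  unfold Spec_parse_article_content parse_article_content parse_article_content_alt
  dsimp only
  have h := aStep_foldl_false ((PySem.Str.split? content "\n").getD []) PySem.Dict.empty []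
  simp only [List.nil_append] at h
  simp only [Prod.ext_iff] at h
  rw [h.1, h.2]
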